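-- pv_equiv track=rewrite | github.com/Fondamenti18/fondamenti-di-programmazione | students/1812571/homework05/program02.py | calcOtherCarsData
-- ===== SOURCE A (Python) =====
-- def findOtherCarsPosition(grid, myCar):
--     carsDict = dict()
--     gW = len(grid[0])
--     gH = len(grid)
--     for rowC in range(0,gH):
--         for elC in range(0,gW):
--             el = grid[rowC][elC]
--             if ((el >= "A") and (el <= "Z") and el!=myCar and el!="O"):
--                 carsDict[el] = (elC,rowC)
--     return carsDict
--
-- def calcOtherCarsData(currentGrid, previousGrid, myCar):
--     carsP = findOtherCarsPosition(previousGrid, myCar)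
--     carsN = findOtherCarsPosition(currentGrid, myCar)
--     fullDict = dict()
--     for k in carsP:
--         if (k in carsN):
--             carKNPos = carsN[k]
--             carkPPos = carsP[k]
--             velX = carKNPos[0] - carkPPos[0]
--             velY = carKNPos[1] - carkPPos[1]
--             fullDict[k] = [carKNPos[0], carKNPos[1], velX, velY]
--     return fullDict
-- ===== SOURCE B (Python) =====
-- def calcOtherCarsData(currentGrid, previousGrid, myCar):
--     w = len(currentGrid[0])
--     cur = {}
--     for y, row in enumerate(currentGrid):
--         for x, ch in enumerate(row[:w]):
--             if "A" <= ch <= "Z" and ch != myCar and ch != "O":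
--                 cur[ch] = (x, y)
--     w = len(previousGrid[0])
--     full = {}
--     for y, row in enumerate(previousGrid):
--         for x, ch in enumerate(row[:w]):
--             if ch in cur:
--                 cx, cy = cur[ch]
--                 full[ch] = [cx, cy, cx - x, cy - y]
--     return full
-- ===== Notes on version B (the rewrite author's own statement) =====
-- stated objective: simpler
-- what changed: B builds only one position dict (from the current grid, enumerate-based instead of index loops) and fuses A's previous-grid dict pass and its key-matching loop into a single scan of the previous grid that overwrites entries so the last occurrence wins, dropping A's second dict and third loop.
import Mathlib
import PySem

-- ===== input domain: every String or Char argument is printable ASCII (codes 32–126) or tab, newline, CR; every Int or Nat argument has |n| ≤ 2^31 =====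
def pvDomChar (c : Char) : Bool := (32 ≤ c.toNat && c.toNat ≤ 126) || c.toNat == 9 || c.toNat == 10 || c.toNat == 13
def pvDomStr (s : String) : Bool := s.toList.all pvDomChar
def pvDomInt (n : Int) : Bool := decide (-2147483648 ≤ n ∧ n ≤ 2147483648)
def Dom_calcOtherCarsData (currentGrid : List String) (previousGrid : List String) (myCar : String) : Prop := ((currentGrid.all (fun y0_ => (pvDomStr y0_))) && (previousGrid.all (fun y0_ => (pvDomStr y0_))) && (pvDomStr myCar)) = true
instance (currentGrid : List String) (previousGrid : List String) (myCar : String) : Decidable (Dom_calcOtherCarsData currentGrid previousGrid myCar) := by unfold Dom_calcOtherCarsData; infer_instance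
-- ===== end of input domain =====

-- B keeps only the current-grid position dict and fuses A's previous-grid pass and matching
-- loop into one scan of the previous grid (simpler decomposition; same asymptotic cost).


-- The cell test '"A" <= el <= "Z" and el != myCar and el != "O"' of BOTH Pythons; the two
-- one-character string comparisons are done on the Char (identical on single-char strings).
def pvValid (c : Char) (myCar : String) : Bool :=
  decide ('A' ≤ c) && decide (c ≤ 'Z') && !(String.singleton c == myCar) && !(c == 'O')

-- ===== PORT A =====
def findOtherCarsPosition (grid : List String) (myCar : String) : PySem.Dict String (Int × Int) :=
  let gW : Int := PySem.Str.len (PySem.List.pyGetD grid 0 "")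
  let gH : Int := (grid.length : Int)
  (PySem.List.pyRange 0 gH 1).foldl (fun d rowC =>
    (PySem.List.pyRange 0 gW 1).foldl (fun d elC =>
      let el : Char := PySem.List.pyGetD (PySem.List.pyGetD grid rowC "").toList elC ' '
      if pvValid el myCar then d.insert (String.singleton el) (elC, rowC) else d) d)
    PySem.Dict.empty

def calcOtherCarsData (currentGrid : List String) (previousGrid : List String) (myCar : String) : List (String × List Int) :=
  let carsP := findOtherCarsPosition previousGrid myCar
  let carsN := findOtherCarsPosition currentGrid myCar
  let fullDict := carsP.keys.foldl (fun d k =>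
    if carsN.contains k then
      let carKNPos := carsN.getD k (0, 0)
      let carkPPos := carsP.getD k (0, 0)
      let velX := carKNPos.1 - carkPPos.1
      let velY := carKNPos.2 - carkPPos.2
      d.insert k [carKNPos.1, carKNPos.2, velX, velY]
    else d) PySem.Dict.empty
  fullDict.items

-- ===== PORT B =====
def calcOtherCarsData_alt (currentGrid : List String) (previousGrid : List String) (myCar : String) : List (String × List Int) :=
  let wC : Int := PySem.Str.len (PySem.List.pyGetD currentGrid 0 "")
  let cur := (PySem.List.enumerate currentGrid 0).foldl (fun d yr =>
      (PySem.List.enumerate (PySem.List.slice yr.2.toList none (some wC)) 0).foldl (fun d xc =>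
        if pvValid xc.2 myCar then d.insert (String.singleton xc.2) (xc.1, yr.1) else d) d)
    PySem.Dict.empty
  let wP : Int := PySem.Str.len (PySem.List.pyGetD previousGrid 0 "")
  let full := (PySem.List.enumerate previousGrid 0).foldl (fun d yr =>
      (PySem.List.enumerate (PySem.List.slice yr.2.toList none (some wP)) 0).foldl (fun d xc =>
        if cur.contains (String.singleton xc.2) then
          let c := cur.getD (String.singleton xc.2) (0, 0)
          d.insert (String.singleton xc.2) [c.1, c.2, c.1 - xc.1, c.2 - yr.1]
        else d) d)
    PySem.Dict.empty
  full.items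

-- ===== PRECONDITION & SPEC =====
-- Pre_ excludes exactly the inputs on which A raises IndexError: an empty grid ('grid[0]'),
-- or a grid in which some row is shorter than that grid's first row ('grid[rowC][elC]').
def Pre_calcOtherCarsData (currentGrid : List String) (previousGrid : List String) (myCar : String) : Prop :=
  currentGrid ≠ [] ∧ previousGrid ≠ [] ∧
  (∀ row ∈ currentGrid, (currentGrid.getD 0 "").toList.length ≤ row.toList.length) ∧
  (∀ row ∈ previousGrid, (previousGrid.getD 0 "").toList.length ≤ row.toList.length)
instance (currentGrid : List String) (previousGrid : List String) (myCar : String) : Decidable (Pre_calcOtherCarsData currentGrid previousGrid myCar) := by unfold Pre_calcOtherCarsData; infer_instance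

def pvWitness_calcOtherCarsData : List String × List String × String := (["AB", ".B"], ["BA"], "X")

def Spec_calcOtherCarsData (currentGrid : List String) (previousGrid : List String) (myCar : String) (out : List (String × List Int)) : Prop := out = calcOtherCarsData_alt currentGrid previousGrid myCar
instance (currentGrid : List String) (previousGrid : List String) (myCar : String) (out : List (String × List Int)) : Decidable (Spec_calcOtherCarsData currentGrid previousGrid myCar out) := by unfold Spec_calcOtherCarsData; infer_instance

-- ===== CLAIM (what is proved, stated in full; the proofs are below) =====
def Claim_equal_calcOtherCarsData : Prop := ∀ (currentGrid : List String) (previousGrid : List String) (myCar : String), Dom_calcOtherCarsData currentGrid previousGrid myCar → Pre_calcOtherCarsData currentGrid previousGrid myCar → Spec_calcOtherCarsData currentGrid previousGrid myCar (calcOtherCarsData currentGrid previousGrid myCar)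
-- ===== LEMMAS AND PROOFS =====

-- The stream of cells (x, y, char) of a grid read row-major, each row truncated to width w.
def pvCells (grid : List String) (w : Nat) : List (Int × Int × Char) :=
  (PySem.List.enumerate grid 0).flatMap (fun yr =>
    (PySem.List.enumerate (yr.2.toList.take w) 0).map (fun xc => (xc.1, yr.1, xc.2)))

def pvKey (p : Int × Int × Char) : String := String.singleton p.2.2

-- The position dict both stage-1 scans build.
def pvBuildPos (cells : List (Int × Int × Char)) (myCar : String) : PySem.Dict String (Int × Int) :=
  cells.foldl (fun d p => if pvValid p.2.2 myCar then d.insert (pvKey p) (p.1, p.2.1) else d)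
    PySem.Dict.empty

-- The velocity record, as A computes it (lookups in both dicts) …
def pvValA (N P : PySem.Dict String (Int × Int)) (k : String) : List Int :=
  [(N.getD k (0, 0)).1, (N.getD k (0, 0)).2,
   (N.getD k (0, 0)).1 - (P.getD k (0, 0)).1, (N.getD k (0, 0)).2 - (P.getD k (0, 0)).2]

-- … and as B computes it (lookup in the current dict, coordinates from the visited cell).
def pvValB (N : PySem.Dict String (Int × Int)) (p : Int × Int × Char) : List Int :=
  [(N.getD (pvKey p) (0, 0)).1, (N.getD (pvKey p) (0, 0)).2,
   (N.getD (pvKey p) (0, 0)).1 - p.1, (N.getD (pvKey p) (0, 0)).2 - p.2.1]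

-- 'for j in range(n): ... xs[j] ...' with the index used too, as an enumerate fold (n <= len xs).
theorem pv_foldl_pyRange_take {α β : Type} (xs : List α) (dflt : α) (f : β → Int → α → β)
    (n : Nat) (hn : n ≤ xs.length) (init : β) :
    (PySem.List.pyRange 0 (n : Int) 1).foldl
        (fun acc j => f acc j (PySem.List.pyGetD xs j dflt)) init
      = (PySem.List.enumerate (xs.take n) 0).foldl (fun acc p => f acc p.1 p.2) init := by
  induction n generalizing init with
  | zero => simp [PySem.List.pyRange_one_eq_nil, PySem.List.enumerate_nil]
  | succ n ih =>
    have h0 : ((n + 1 : Nat) : Int) = (n : Int) + 1 := by push_cast; ring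
    have hlt : n < xs.length := hn
    rw [h0, PySem.List.pyRange_one_succ_right (by positivity), List.foldl_append,
      ih (Nat.le_of_lt hlt)]
    have htake : xs.take (n + 1) = xs.take n ++ [xs[n]] := by
      rw [List.take_add_one, List.getElem?_eq_getElem hlt]; rfl
    rw [htake, PySem.List.enumerate_append, List.foldl_append]
    have hlen : (xs.take n).length = n := by simp [Nat.le_of_lt hlt]
    rw [hlen]
    simp [PySem.List.enumerate_cons, PySem.List.enumerate_nil, List.getElem?_eq_getElem hlt]

-- A nested 'for y,row / for x,ch' scan is a fold over the cell stream.
theorem pv_nested_enum_foldl (grid : List String) (w : Nat) {γ : Type}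
    (f : γ → (Int × Int × Char) → γ) (init : γ) :
    (PySem.List.enumerate grid 0).foldl (fun acc yr =>
        (PySem.List.enumerate (yr.2.toList.take w) 0).foldl
          (fun acc xc => f acc (xc.1, yr.1, xc.2)) acc) init
      = (pvCells grid w).foldl f init := by
  rw [pvCells, List.foldl_flatMap]
  apply PySem.List.foldl_congr_mem
  intro acc yr _
  exact List.foldl_map.symm

-- getD of an insert-key loop: the value of the LAST element of l whose key is k.
theorem pv_getD_foldl_insert_key {α K V : Type} [BEq K] [LawfulBEq K] [DecidableEq K]
    (l : List α) (key : α → K) (v : α → V) (d : PySem.Dict K V) (k : K) (dflt : V) :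
    (l.foldl (fun d a => d.insert (key a) (v a)) d).getD k dflt =
      match l.reverse.find? (fun a => key a == k) with
      | some a => v a
      | none => d.getD k dflt := by
  induction l using List.reverseRecOn with
  | nil => simp
  | append_singleton l a ih =>
    rw [List.foldl_append]
    simp only [List.foldl_cons, List.foldl_nil, List.reverse_append, List.reverse_cons,
      List.reverse_nil, List.nil_append, List.cons_append, List.find?]
    rw [PySem.Dict.getD_insert]
    by_cases hk : k = key a
    · simp [hk]
    · have : (key a == k) = false := by simp [Ne.symm hk]
      simp [hk, this, ih]

theorem pv_ofList_filter {α : Type} [BEq α] [LawfulBEq α] (q : α → Bool) (l : List α) :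
    PySem.Set.ofList (l.filter q) = (PySem.Set.ofList l).filter q := by
  induction l using List.reverseRecOn with
  | nil => rfl
  | append_singleton l a ih =>
    cases hq : q a with
    | true =>
      have h1 : List.filter q (l ++ [a]) = List.filter q l ++ [a] := by
        simp [List.filter_append, hq]
      rw [h1, PySem.Set.ofList_append_singleton, PySem.Set.ofList_append_singleton, ih,
        PySem.Set.add_eq_ite, PySem.Set.add_eq_ite]
      by_cases hm : a ∈ PySem.Set.ofList l
      · have hm2 : a ∈ (PySem.Set.ofList l).filter q := List.mem_filter.mpr ⟨hm, hq⟩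
        simp [hm, hm2]
      · have hm2 : a ∉ (PySem.Set.ofList l).filter q := fun h => hm (List.mem_filter.mp h).1
        simp [hm, hm2, List.filter_append, hq]
    | false =>
      have h1 : List.filter q (l ++ [a]) = List.filter q l := by
        simp [List.filter_append, hq]
      rw [h1, ih, PySem.Set.ofList_append_singleton, PySem.Set.add_eq_ite]
      by_cases hm : a ∈ PySem.Set.ofList l
      · simp [hm]
      · simp [hm, List.filter_append, hq]

theorem pv_find?_filter_of_imp {α : Type} (p q : α → Bool) (l : List α)
    (h : ∀ a, p a = true → q a = true) : (l.filter q).find? p = l.find? p := by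
  induction l with
  | nil => rfl
  | cons a l ih =>
    by_cases hq : q a = true
    · simp only [List.filter_cons, hq, if_pos]
      by_cases hp : p a = true
      · simp [List.find?, hp]
      · simp only [Bool.not_eq_true] at hp
        simp [List.find?, hp, ih]
    · simp only [Bool.not_eq_true] at hq
      have hp : p a = false := by
        cases hpa : p a with
        | false => rfl
        | true => exact absurd (h a hpa) (by simp [hq])
      simp [hq, List.find?, hp, ih]

theorem pv_find?_beq_of_mem {α : Type} [BEq α] [LawfulBEq α] {l : List α} {k : α}
    (hk : k ∈ l) : l.find? (fun a => a == k) = some k := by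
  cases hf : l.find? (fun a => a == k) with
  | none =>
    have := List.find?_eq_none.mp hf k hk
    simp at this
  | some a =>
    have := List.find?_some hf
    simp at this
    rw [this]

theorem pv_buildPos_eq_filter_fold (L : List (Int × Int × Char)) (myCar : String) :
    pvBuildPos L myCar
      = (L.filter (fun p => pvValid p.2.2 myCar)).foldl
          (fun d p => d.insert (pvKey p) (p.1, p.2.1)) PySem.Dict.empty := by
  rw [pvBuildPos]
  exact PySem.List.foldl_if_eq_foldl_filter _ _ L PySem.Dict.empty

theorem pv_buildPos_keys (L : List (Int × Int × Char)) (myCar : String) :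
    (pvBuildPos L myCar).keys
      = PySem.Set.ofList ((L.filter (fun p => pvValid p.2.2 myCar)).map pvKey) := by
  rw [pv_buildPos_eq_filter_fold,
    PySem.Dict.keys_foldl_insert_key (key := pvKey) (f := fun _ p => (p.1, p.2.1))]
  simp [PySem.Set.update_nil_left]

theorem pv_valid_of_contains (L : List (Int × Int × Char)) (myCar : String) (c : Char)
    (h : (pvBuildPos L myCar).contains (String.singleton c) = true) :
    pvValid c myCar = true := by
  have hm : String.singleton c ∈ (pvBuildPos L myCar).keys :=
    (PySem.Dict.contains_iff_mem_keys _ _).mp h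
  rw [pv_buildPos_keys, PySem.Set.mem_ofList] at hm
  obtain ⟨p, hp, hpk⟩ := List.mem_map.mp hm
  have hc : p.2.2 = c := by
    have := congrArg String.toList hpk
    simpa [pvKey] using this
  exact hc ▸ (List.mem_filter.mp hp).2

-- A's findOtherCarsPosition is pvBuildPos of the cell stream (every row at least w wide).
theorem pv_find_eq_buildPos (grid : List String) (myCar : String)
    (h : ∀ row ∈ grid, (grid.getD 0 "").toList.length ≤ row.toList.length) :
    findOtherCarsPosition grid myCar
      = pvBuildPos (pvCells grid (grid.getD 0 "").toList.length) myCar := by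
  have hgW : PySem.Str.len (PySem.List.pyGetD grid 0 "")
      = (((grid.getD 0 "").toList.length : Nat) : Int) := by
    rw [PySem.List.pyGetD_zero]; simp [PySem.Str.len_eq]
  simp only [findOtherCarsPosition, hgW]
  calc
    (PySem.List.pyRange 0 (grid.length : Int) 1).foldl (fun d rowC =>
        (PySem.List.pyRange 0 (((grid.getD 0 "").toList.length : Nat) : Int) 1).foldl
          (fun d elC =>
            if pvValid (PySem.List.pyGetD (PySem.List.pyGetD grid rowC "").toList elC ' ') myCar
            then d.insert
              (String.singleton (PySem.List.pyGetD (PySem.List.pyGetD grid rowC "").toList elC ' '))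
              (elC, rowC)
            else d) d) PySem.Dict.empty
      = (PySem.List.enumerate (grid.take grid.length) 0).foldl (fun acc yr =>
          (PySem.List.pyRange 0 (((grid.getD 0 "").toList.length : Nat) : Int) 1).foldl
            (fun d elC =>
              if pvValid (PySem.List.pyGetD yr.2.toList elC ' ') myCar
              then d.insert (String.singleton (PySem.List.pyGetD yr.2.toList elC ' '))
                (elC, yr.1)
              else d) acc) PySem.Dict.empty :=
        pv_foldl_pyRange_take grid "" (fun acc j row =>
          (PySem.List.pyRange 0 (((grid.getD 0 "").toList.length : Nat) : Int) 1).foldl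
            (fun d elC =>
              if pvValid (PySem.List.pyGetD row.toList elC ' ') myCar
              then d.insert (String.singleton (PySem.List.pyGetD row.toList elC ' ')) (elC, j)
              else d) acc) grid.length le_rfl PySem.Dict.empty
    _ = (PySem.List.enumerate grid 0).foldl (fun acc yr =>
          (PySem.List.enumerate (yr.2.toList.take (grid.getD 0 "").toList.length) 0).foldl
            (fun acc xc =>
              if pvValid xc.2 myCar
              then acc.insert (String.singleton xc.2) (xc.1, yr.1)
              else acc) acc) PySem.Dict.empty := by
        rw [List.take_length]
        apply PySem.List.foldl_congr_mem
        intro acc yr hyr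
        have hrow : yr.2 ∈ grid := by
          obtain ⟨j, hj, hyr'⟩ := (PySem.List.mem_enumerate_iff _ _ _).mp hyr
          have : yr.2 = grid[j] := by rw [hyr']
          rw [this]
          exact List.getElem_mem hj
        exact pv_foldl_pyRange_take yr.2.toList ' '
          (fun d elC c =>
            if pvValid c myCar then d.insert (String.singleton c) (elC, yr.1) else d)
          (grid.getD 0 "").toList.length (h yr.2 hrow) acc
    _ = pvBuildPos (pvCells grid (grid.getD 0 "").toList.length) myCar :=
        pv_nested_enum_foldl grid (grid.getD 0 "").toList.length
          (fun d p => if pvValid p.2.2 myCar then d.insert (pvKey p) (p.1, p.2.1) else d)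
          PySem.Dict.empty

-- B's first scan is pvBuildPos of the same cell stream (no width hypothesis: slices clamp).
theorem pv_alt_scan (grid : List String) (myCar : String) :
    (PySem.List.enumerate grid 0).foldl (fun d yr =>
        (PySem.List.enumerate (PySem.List.slice yr.2.toList none
            (some (PySem.Str.len (PySem.List.pyGetD grid 0 "")))) 0).foldl
          (fun d xc =>
            if pvValid xc.2 myCar then d.insert (String.singleton xc.2) (xc.1, yr.1) else d) d)
      PySem.Dict.empty
    = pvBuildPos (pvCells grid (grid.getD 0 "").toList.length) myCar := by
  have hgW : PySem.Str.len (PySem.List.pyGetD grid 0 "")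
      = (((grid.getD 0 "").toList.length : Nat) : Int) := by
    rw [PySem.List.pyGetD_zero]; simp [PySem.Str.len_eq]
  simp only [hgW, PySem.List.slice_to_natCast]
  exact pv_nested_enum_foldl grid (grid.getD 0 "").toList.length
    (fun d p => if pvValid p.2.2 myCar then d.insert (pvKey p) (p.1, p.2.1) else d)
    PySem.Dict.empty

-- B's second scan, as a fold over the previous grid's cell stream.
theorem pv_alt_scan2 (grid : List String) (cur : PySem.Dict String (Int × Int)) :
    (PySem.List.enumerate grid 0).foldl (fun d yr =>
        (PySem.List.enumerate (PySem.List.slice yr.2.toList none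
            (some (PySem.Str.len (PySem.List.pyGetD grid 0 "")))) 0).foldl
          (fun d xc =>
            if cur.contains (String.singleton xc.2) then
              d.insert (String.singleton xc.2)
                [(cur.getD (String.singleton xc.2) (0, 0)).1,
                 (cur.getD (String.singleton xc.2) (0, 0)).2,
                 (cur.getD (String.singleton xc.2) (0, 0)).1 - xc.1,
                 (cur.getD (String.singleton xc.2) (0, 0)).2 - yr.1]
            else d) d)
      PySem.Dict.empty
    = (pvCells grid (grid.getD 0 "").toList.length).foldl
        (fun d p => if cur.contains (pvKey p) then d.insert (pvKey p) (pvValB cur p) else d)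
        PySem.Dict.empty := by
  have hgW : PySem.Str.len (PySem.List.pyGetD grid 0 "")
      = (((grid.getD 0 "").toList.length : Nat) : Int) := by
    rw [PySem.List.pyGetD_zero]; simp [PySem.Str.len_eq]
  simp only [hgW, PySem.List.slice_to_natCast]
  exact pv_nested_enum_foldl grid (grid.getD 0 "").toList.length
    (fun d p => if cur.contains (pvKey p) then d.insert (pvKey p) (pvValB cur p) else d)
    PySem.Dict.empty

-- The heart: B's fused previous-grid scan equals A's loop over the previous dict's keys.
theorem pv_stage2 (Lp : List (Int × Int × Char)) (N : PySem.Dict String (Int × Int))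
    (myCar : String)
    (hN : ∀ c : Char, N.contains (String.singleton c) = true → pvValid c myCar = true) :
    Lp.foldl (fun d p => if N.contains (pvKey p) then d.insert (pvKey p) (pvValB N p) else d)
        PySem.Dict.empty
      = (pvBuildPos Lp myCar).keys.foldl
          (fun d k => if N.contains k then d.insert k (pvValA N (pvBuildPos Lp myCar) k) else d)
          PySem.Dict.empty := by
  have hPkeys : (pvBuildPos Lp myCar).keys
      = PySem.Set.ofList ((Lp.filter (fun p => pvValid p.2.2 myCar)).map pvKey) :=
    pv_buildPos_keys Lp myCar
  have hPnodup : (pvBuildPos Lp myCar).keys.Nodup := by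
    rw [hPkeys]; exact PySem.Set.nodup_ofList _
  -- both loops, with their guards turned into filters
  have hL : Lp.foldl
        (fun d p => if N.contains (pvKey p) then d.insert (pvKey p) (pvValB N p) else d)
        PySem.Dict.empty
      = ((Lp.filter (fun p => pvValid p.2.2 myCar)).filter (fun p => N.contains (pvKey p))).foldl
          (fun d p => d.insert (pvKey p) (pvValB N p)) PySem.Dict.empty := by
    rw [PySem.List.foldl_if_eq_foldl_filter (fun p => N.contains (pvKey p))
        (fun d p => d.insert (pvKey p) (pvValB N p)) Lp PySem.Dict.empty]
    congr 1
    rw [List.filter_filter]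
    apply List.filter_congr
    intro p _
    cases hc : N.contains (pvKey p) with
    | true => simp [hN p.2.2 hc]
    | false => simp
  have hR : (pvBuildPos Lp myCar).keys.foldl
        (fun d k => if N.contains k then d.insert k (pvValA N (pvBuildPos Lp myCar) k) else d)
        PySem.Dict.empty
      = ((pvBuildPos Lp myCar).keys.filter (fun k => N.contains k)).foldl
          (fun d k => d.insert k (pvValA N (pvBuildPos Lp myCar) k)) PySem.Dict.empty :=
    PySem.List.foldl_if_eq_foldl_filter _ _ _ _
  -- the two result dicts have the same keys, in the same order
  have hmapfilter : ((Lp.filter (fun p => pvValid p.2.2 myCar)).filter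
        (fun p => N.contains (pvKey p))).map pvKey
      = ((Lp.filter (fun p => pvValid p.2.2 myCar)).map pvKey).filter (fun k => N.contains k) := by
    rw [List.filter_map]; rfl
  have hkL : (((Lp.filter (fun p => pvValid p.2.2 myCar)).filter
          (fun p => N.contains (pvKey p))).foldl
          (fun d p => d.insert (pvKey p) (pvValB N p)) PySem.Dict.empty).keys
      = (pvBuildPos Lp myCar).keys.filter (fun k => N.contains k) := by
    rw [PySem.Dict.keys_foldl_insert_key (key := pvKey) (f := fun _ p => pvValB N p),
      PySem.Dict.keys_empty, PySem.Set.update_nil_left, hmapfilter, pv_ofList_filter, ← hPkeys]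
  have hkR : (((pvBuildPos Lp myCar).keys.filter (fun k => N.contains k)).foldl
          (fun d k => d.insert k (pvValA N (pvBuildPos Lp myCar) k)) PySem.Dict.empty).keys
      = (pvBuildPos Lp myCar).keys.filter (fun k => N.contains k) := by
    rw [PySem.Dict.keys_foldl_insert_key (key := fun k => k)
        (f := fun _ k => pvValA N (pvBuildPos Lp myCar) k),
      PySem.Dict.keys_empty, PySem.Set.update_nil_left, List.map_id']
    exact PySem.Set.ofList_eq_self_of_nodup _ (List.Nodup.filter _ hPnodup)
  have hndL := PySem.Dict.nodup_keys_foldl_insert_key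
    ((Lp.filter (fun p => pvValid p.2.2 myCar)).filter (fun p => N.contains (pvKey p)))
    pvKey (fun _ p => pvValB N p) PySem.Dict.empty PySem.Dict.nodup_keys_empty
  have hndR := PySem.Dict.nodup_keys_foldl_insert_key
    ((pvBuildPos Lp myCar).keys.filter (fun k => N.contains k))
    (fun k => k) (fun _ k => pvValA N (pvBuildPos Lp myCar) k)
    PySem.Dict.empty PySem.Dict.nodup_keys_empty
  rw [hL, hR]
  apply PySem.Dict.ext
  rw [PySem.Dict.items_eq_map_keys _ hndL ([] : List Int),
    PySem.Dict.items_eq_map_keys _ hndR ([] : List Int), hkL, hkR]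
  apply List.map_congr_left
  intro k hk
  have hkq : N.contains k = true := (List.mem_filter.mp hk).2
  have hkP : k ∈ (pvBuildPos Lp myCar).keys := (List.mem_filter.mp hk).1
  have hkLpv : k ∈ (Lp.filter (fun p => pvValid p.2.2 myCar)).map pvKey := by
    rw [hPkeys] at hkP
    simpa [PySem.Set.mem_ofList] using hkP
  obtain ⟨p0, hp0, hp0k⟩ := List.mem_map.mp hkLpv
  -- the last previous-grid cell carrying key k
  have hfind : ∃ a, (Lp.filter (fun p => pvValid p.2.2 myCar)).reverse.find?
      (fun p => pvKey p == k) = some a ∧ pvKey a = k := by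
    cases hf : (Lp.filter (fun p => pvValid p.2.2 myCar)).reverse.find?
        (fun p => pvKey p == k) with
    | none =>
      have := List.find?_eq_none.mp hf p0 (List.mem_reverse.mpr hp0)
      simp [hp0k] at this
    | some a =>
      have := List.find?_some hf
      exact ⟨a, rfl, by simpa using this⟩
  obtain ⟨a, hfa, hak⟩ := hfind
  have e1 := pv_getD_foldl_insert_key
    ((Lp.filter (fun p => pvValid p.2.2 myCar)).filter (fun p => N.contains (pvKey p)))
    pvKey (pvValB N) PySem.Dict.empty k ([] : List Int)
  have hrev : ((Lp.filter (fun p => pvValid p.2.2 myCar)).filter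
        (fun p => N.contains (pvKey p))).reverse
      = (Lp.filter (fun p => pvValid p.2.2 myCar)).reverse.filter
          (fun p => N.contains (pvKey p)) := by
    simp [List.filter_reverse]
  rw [hrev, pv_find?_filter_of_imp (fun p => pvKey p == k) (fun p => N.contains (pvKey p))
      ((Lp.filter (fun p => pvValid p.2.2 myCar)).reverse)
      (by intro a2 ha2
          have ha2' : pvKey a2 = k := by simpa using ha2
          show N.contains (pvKey a2) = true
          rw [ha2']; exact hkq),
    hfa] at e1
  have e2 := pv_getD_foldl_insert_key
    ((pvBuildPos Lp myCar).keys.filter (fun k => N.contains k))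
    (fun k => k) (pvValA N (pvBuildPos Lp myCar)) PySem.Dict.empty k ([] : List Int)
  rw [pv_find?_beq_of_mem (List.mem_reverse.mpr hk)] at e2
  have e3 := pv_getD_foldl_insert_key (Lp.filter (fun p => pvValid p.2.2 myCar))
    pvKey (fun p => (p.1, p.2.1)) PySem.Dict.empty k ((0, 0) : Int × Int)
  rw [hfa] at e3
  have hPget : (pvBuildPos Lp myCar).getD k (0, 0) = (a.1, a.2.1) := by
    rw [pv_buildPos_eq_filter_fold]; exact e3
  refine congrArg (Prod.mk k) ?_
  rw [e1, e2]
  show pvValB N a = pvValA N (pvBuildPos Lp myCar) k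
  rw [pvValB, pvValA, hak, hPget]

-- ===== VERDICT (by name: the statement is the Claim_ definition above) =====
theorem calcOtherCarsData_spec : Claim_equal_calcOtherCarsData := by
  intro cg pg mc _ hp
  obtain ⟨hc0, hp0, hcw, hpw⟩ := hp
  unfold Spec_calcOtherCarsData
  simp only [calcOtherCarsData, calcOtherCarsData_alt]
  rw [pv_find_eq_buildPos pg mc hpw, pv_find_eq_buildPos cg mc hcw,
    pv_alt_scan cg mc, pv_alt_scan2 pg (pvBuildPos (pvCells cg (cg.getD 0 "").toList.length) mc)]
  exact congrArg PySem.Dict.items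
    (pv_stage2 (pvCells pg (pg.getD 0 "").toList.length)
      (pvBuildPos (pvCells cg (cg.getD 0 "").toList.length) mc) mc
      (fun c h => pv_valid_of_contains _ mc c h)).symm
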